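-- pv_equiv track=rewrite | github.com/hjyoon/baekjoon-answers | 3518.py | solution
-- ===== SOURCE A (Python) =====
-- def solution(s):
--     ans = []
--     s = map(lambda x:x.strip(), s.split('\n'))
--     s = list(map(lambda x:x.split(), s))
--     m = len(max(s, key=lambda x:len(x)))
--     sz = [0] * m
--     for i in range(m):
--         for v in s:
--             if i >= len(v):
--                 continue
--             else:
--                 sz[i] = max(sz[i], len(v[i]))
--
--     for v in s:
--         tmp = []
--         for i, w in enumerate(v):
--             if i == len(v)-1:
--                 tmp.append(w)
--             else:
--                 tmp.append(w + ((sz[i]-len(w)) * ' '))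
--         ans.append(tmp)
--     ans = map(lambda x:' '.join(x), ans)
--     ans = '\n'.join(ans)
--     return ans
-- ===== SOURCE B (Python) =====
-- def solution(s):
--     rows = [line.strip().split() for line in s.split('\n')]
--     # column widths as a zipWith-max over rows (running list merged with each row)
--     sz = []
--     for v in rows:
--         sz = [max(a, len(w)) for a, w in zip(sz, v)] \
--              + [len(w) for w in v[len(sz):]] + sz[len(v):]
--     # tab stops: absolute start offset of each column
--     starts, pos = [], 0
--     for a in sz:
--         starts.append(pos)
--         pos = pos + a + 1
--     # render each line by writing every word at its column's absolute offset
--     lines = []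
--     for v in rows:
--         buf, n = [], 0
--         for i, w in enumerate(v):
--             buf.append(' ' * (starts[i] - n) + w)
--             n = starts[i] + len(w)
--         lines.append(''.join(buf))
--     return '\n'.join(lines)
-- ===== Notes on version B (the rewrite author's own statement) =====
-- stated objective: alternative
-- what changed: B renders by tab stops: it merges rows into the width list with a zipWith-max comprehension, converts widths to absolute column start offsets by a running sum, and writes each line with a cursor that pads from the current position to the next word's offset — no per-word ljust/pad and no last-word branch, where A scans column-by-column with an i>=len(v) skip and pads every non-final word.
import Mathlib
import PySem

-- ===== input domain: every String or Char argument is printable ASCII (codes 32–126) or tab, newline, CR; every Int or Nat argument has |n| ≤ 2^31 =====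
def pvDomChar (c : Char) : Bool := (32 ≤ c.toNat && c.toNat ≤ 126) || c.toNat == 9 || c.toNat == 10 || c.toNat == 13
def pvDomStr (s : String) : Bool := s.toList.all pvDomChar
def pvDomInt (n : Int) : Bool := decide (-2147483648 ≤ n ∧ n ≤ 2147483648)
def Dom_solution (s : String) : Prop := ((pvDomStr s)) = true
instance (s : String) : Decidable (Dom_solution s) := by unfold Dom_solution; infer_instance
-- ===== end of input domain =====

-- B renders by tab stops: it merges the rows into the column-width list with a zipWith-max
-- comprehension, turns it into absolute column start offsets by a running sum, and writes each
-- line with a cursor, padding from the cursor to each word's offset (no last-word branch, no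
-- per-word ljust); objective: alternative algorithm of the same cost.

-- ===== PORT A =====
-- ' ' * n  (empty for n ≤ 0)
def padA (n : Int) : String := String.ofList (List.replicate n.toNat ' ')

def solution (s : String) : String :=
  let rows := ((PySem.Str.split? s "\n").getD []).map (fun x => PySem.Str.strip x)
  let rows := rows.map (fun x => PySem.Str.split₀ x)
  -- m = len(max(s, key=len)); rows is never empty (split('\n') yields ≥ 1 piece), so the .getD [] is unreachable
  let m := PySem.List.len ((PySem.List.max? rows (fun x => PySem.List.len x)).getD [])
  let sz : List Int :=
    (PySem.List.pyRange 0 m 1).foldl (fun sz i =>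
      rows.foldl (fun sz v =>
        if i ≥ PySem.List.len v then sz
        else PySem.List.pySetD sz i
          (max (PySem.List.pyGetD sz i 0) (PySem.Str.len (PySem.List.pyGetD v i ""))))
        sz)
      (List.replicate m.toNat 0)
  let ans := rows.foldl (fun ans v =>
      ans ++ [(PySem.List.enumerate v 0).foldl (fun tmp p =>
        if p.1 == PySem.List.len v - 1 then tmp ++ [p.2]
        else tmp ++ [p.2 ++ padA (PySem.List.pyGetD sz p.1 0 - PySem.Str.len p.2)]) []]) []
  PySem.Str.join "\n" (ans.map (fun x => PySem.Str.join " " x))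

-- ===== PORT B =====
def solution_alt (s : String) : String :=
  let rows := ((PySem.Str.split? s "\n").getD []).map
      (fun line => PySem.Str.split₀ (PySem.Str.strip line))
  -- sz = [max(a,len(w)) for a,w in zip(sz,v)] + [len(w) for w in v[len(sz):]] + sz[len(v):]
  let sz : List Int := rows.foldl (fun sz v =>
      (sz.zip v).map (fun p => max p.1 (PySem.Str.len p.2))
        ++ (PySem.List.slice v (some (PySem.List.len sz)) none).map (fun w => PySem.Str.len w)
        ++ PySem.List.slice sz (some (PySem.List.len v)) none) []
  -- starts, pos = [], 0; for a in sz: starts.append(pos); pos = pos + a + 1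
  let sp := sz.foldl (fun (sp : List Int × Int) a => (sp.1 ++ [sp.2], sp.2 + a + 1)) ([], 0)
  let starts := sp.1
  -- buf, n = [], 0; for i, w in enumerate(v): buf.append(' '*(starts[i]-n) + w); n = starts[i]+len(w)
  let lines := rows.foldl (fun lines v =>
      let bn := (PySem.List.enumerate v 0).foldl (fun (bn : List String × Int) p =>
          (bn.1 ++ [padA (PySem.List.pyGetD starts p.1 0 - bn.2) ++ p.2],
           PySem.List.pyGetD starts p.1 0 + PySem.Str.len p.2)) ([], 0)
      lines ++ [PySem.Str.join "" bn.1]) []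
  PySem.Str.join "\n" lines

-- ===== PRECONDITION & SPEC =====
def Spec_solution (s : String) (out : String) : Prop := out = solution_alt s
instance (s : String) (out : String) : Decidable (Spec_solution s out) := by unfold Spec_solution; infer_instance

-- ===== CLAIM (what is proved, stated in full; the proofs are below) =====
def Claim_equal_solution : Prop := ∀ (s : String), Dom_solution s → Spec_solution s (solution s)

-- ===== LEMMAS AND PROOFS =====

-- zipWith max of the running width list with a row's word lengths, overhang kept:
-- the common value of A's and B's width lists
def mergeRow : List Int → List String → List Int
  | l, [] => l
  | [], w :: ws => PySem.Str.len w :: mergeRow [] ws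
  | a :: l, w :: ws => max a (PySem.Str.len w) :: mergeRow l ws

def colFrom (rows : List (List String)) (j : Nat) (a : Int) : Int :=
  rows.foldl (fun a v => if j < v.length then max a (PySem.Str.len (v.getD j "")) else a) a

def Fsz (rows : List (List String)) : List Int := rows.foldl mergeRow []

def innerA (rows : List (List String)) (i : Int) (sz : List Int) : List Int :=
  rows.foldl (fun sz v =>
    if i ≥ PySem.List.len v then sz
    else PySem.List.pySetD sz i
      (max (PySem.List.pyGetD sz i 0) (PySem.Str.len (PySem.List.pyGetD v i "")))) sz

def Abody (rows : List (List String)) : String :=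
  let m := PySem.List.len ((PySem.List.max? rows (fun x => PySem.List.len x)).getD [])
  let sz : List Int :=
    (PySem.List.pyRange 0 m 1).foldl (fun sz i => innerA rows i sz) (List.replicate m.toNat 0)
  let ans := rows.foldl (fun ans v =>
      ans ++ [(PySem.List.enumerate v 0).foldl (fun tmp p =>
        if p.1 == PySem.List.len v - 1 then tmp ++ [p.2]
        else tmp ++ [p.2 ++ padA (PySem.List.pyGetD sz p.1 0 - PySem.Str.len p.2)]) []]) []
  PySem.Str.join "\n" (ans.map (fun x => PySem.Str.join " " x))

def Bbody (rows : List (List String)) : String :=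
  let sz : List Int := rows.foldl (fun sz v =>
      (sz.zip v).map (fun p => max p.1 (PySem.Str.len p.2))
        ++ (PySem.List.slice v (some (PySem.List.len sz)) none).map (fun w => PySem.Str.len w)
        ++ PySem.List.slice sz (some (PySem.List.len v)) none) []
  let sp := sz.foldl (fun (sp : List Int × Int) a => (sp.1 ++ [sp.2], sp.2 + a + 1)) ([], 0)
  let starts := sp.1
  let lines := rows.foldl (fun lines v =>
      let bn := (PySem.List.enumerate v 0).foldl (fun (bn : List String × Int) p =>
          (bn.1 ++ [padA (PySem.List.pyGetD starts p.1 0 - bn.2) ++ p.2],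
           PySem.List.pyGetD starts p.1 0 + PySem.Str.len p.2)) ([], 0)
      lines ++ [PySem.Str.join "" bn.1]) []
  PySem.Str.join "\n" lines

theorem length_mergeRow (l : List Int) (ws : List String) :
    (mergeRow l ws).length = max l.length ws.length := by
  induction ws generalizing l with
  | nil => simp [mergeRow]
  | cons w ws ih =>
    cases l with
    | nil => simp [mergeRow, ih]
    | cons a l => simp [mergeRow, ih]

theorem getD_mergeRow (l : List Int) (ws : List String) (j : Nat) :
    (mergeRow l ws).getD j 0 =
      if j < ws.length then max (l.getD j 0) (PySem.Str.len (ws.getD j "")) else l.getD j 0 := by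
  induction ws generalizing l j with
  | nil => simp [mergeRow]
  | cons w ws ih =>
    cases l with
    | nil =>
      cases j with
      | zero => simp [mergeRow, PySem.Str.len_eq]
      | succ j =>
        simp only [mergeRow, List.getD_cons_succ, List.getD_nil, List.length_cons]
        rw [ih]
        simp only [List.getD_nil]
        split_ifs with h1 h2 h2 <;> simp [PySem.Str.len_eq] <;> omega
    | cons a l =>
      cases j with
      | zero => simp [mergeRow]
      | succ j =>
        simp only [mergeRow, List.getD_cons_succ, List.length_cons]
        rw [ih]
        split_ifs with h1 h2 h2 <;> first | rfl | omega

theorem le_length_Fsz (rows : List (List String)) (v : List String) (hv : v ∈ rows) :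
    v.length ≤ (Fsz rows).length := by
  induction rows using List.reverseRecOn with
  | nil => simp at hv
  | append_singleton rs w ih =>
    simp only [Fsz, List.foldl_append, List.foldl_cons, List.foldl_nil] at *
    rw [length_mergeRow]
    rcases List.mem_append.1 hv with h | h
    · exact le_trans (ih h) (le_max_left _ _)
    · simp at h; subst h; exact le_max_right _ _

theorem length_Fsz_attained (rows : List (List String)) :
    (Fsz rows).length = 0 ∨ ∃ v ∈ rows, (Fsz rows).length = v.length := by
  induction rows using List.reverseRecOn with
  | nil => left; simp [Fsz]
  | append_singleton rs w ih =>
    simp only [Fsz, List.foldl_append, List.foldl_cons, List.foldl_nil] at *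
    rw [length_mergeRow]
    rcases Nat.le_total (rs.foldl mergeRow []).length w.length with h | h
    · right; exact ⟨w, by simp, by omega⟩
    · rcases ih with h0 | ⟨v, hv, he⟩
      · right; exact ⟨w, by simp, by omega⟩
      · right; exact ⟨v, by simp [hv], by omega⟩

theorem getD_Fsz (rows : List (List String)) (j : Nat) :
    (Fsz rows).getD j 0 = colFrom rows j 0 := by
  induction rows using List.reverseRecOn with
  | nil => simp [Fsz, colFrom]
  | append_singleton rs w ih =>
    simp only [Fsz, colFrom, List.foldl_append, List.foldl_cons, List.foldl_nil] at *
    rw [getD_mergeRow, ih]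

theorem innerA_spec (rows : List (List String)) (j : Nat) (sz : List Int) (hj : j < sz.length) :
    (innerA rows (j : Int) sz).length = sz.length ∧
    ∀ k : Nat, (innerA rows (j : Int) sz).getD k 0 =
      if k = j then colFrom rows j (sz.getD j 0) else sz.getD k 0 := by
  induction rows generalizing sz with
  | nil =>
    refine ⟨rfl, fun k => ?_⟩
    simp only [innerA, List.foldl_nil, colFrom]
    by_cases h : k = j
    · subst h; simp
    · simp [h]
  | cons v rows ih =>
    simp only [innerA, List.foldl_cons, colFrom] at *
    by_cases hv : (j : Int) ≥ PySem.List.len v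
    · rw [if_pos hv]
      have hvj : ¬ (j < v.length) := by simp [PySem.List.len_eq] at hv; omega
      refine ⟨(ih sz hj).1, fun k => ?_⟩
      rw [(ih sz hj).2 k]
      simp [hvj]
    · rw [if_neg hv]
      have hvj : j < v.length := by simp [PySem.List.len_eq] at hv ⊢; omega
      set x := max (PySem.List.pyGetD sz (j : Int) 0) (PySem.Str.len (PySem.List.pyGetD v (j : Int) "")) with hx
      have hset : PySem.List.pySetD sz (j : Int) x = sz.set j x := by
        simp [PySem.List.pySetD_natCast]
      rw [hset]
      have hlen : (sz.set j x).length = sz.length := by simp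
      refine ⟨by rw [(ih _ (by omega)).1, hlen], fun k => ?_⟩
      rw [(ih _ (by omega)).2 k]
      have hgd : (sz.set j x).getD j 0 = x := by
        rw [List.getD_eq_getElem _ _ (by simpa using hj)]
        simp
      have hx' : x = max (sz.getD j 0) (PySem.Str.len (v.getD j "")) := by
        rw [hx]
        congr 1
        · simp [PySem.List.pyGetD_natCast]
        · simp [PySem.List.pyGetD_natCast]
      by_cases hk : k = j
      · subst hk
        rw [if_pos rfl, if_pos rfl, hgd, hx']
        simp [hvj]
      · rw [if_neg hk, if_neg hk]
        by_cases hkl : k < sz.length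
        · rw [List.getD_eq_getElem _ _ (by simpa using hkl), List.getD_eq_getElem _ _ hkl]
          simp [List.getElem_set]
          omega
        · rw [List.getD_eq_default _ _ (by simpa using not_lt.1 hkl),
              List.getD_eq_default _ _ (by simpa using not_lt.1 hkl)]

theorem pyRange_succ_last (b : Nat) :
    PySem.List.pyRange 0 ((b : Int) + 1) 1 = PySem.List.pyRange 0 (b : Int) 1 ++ [(b : Int)] := by
  rw [PySem.List.pyRange_one_append 0 (b : Int) ((b : Int) + 1) (by omega) (by omega)]
  congr 1
  rw [PySem.List.pyRange_one_cons (by omega)]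
  have : PySem.List.pyRange ((b : Int) + 1) ((b : Int) + 1) 1 = [] := by
    apply List.eq_nil_of_length_eq_zero
    rw [PySem.List.length_pyRange_one]
    omega
  rw [this]

theorem outerA_spec (rows : List (List String)) (b : Nat) (sz : List Int) (hb : b ≤ sz.length) :
    ((PySem.List.pyRange 0 (b : Int) 1).foldl (fun sz i => innerA rows i sz) sz).length = sz.length ∧
    ∀ k : Nat, ((PySem.List.pyRange 0 (b : Int) 1).foldl (fun sz i => innerA rows i sz) sz).getD k 0 =
      if k < b then colFrom rows k (sz.getD k 0) else sz.getD k 0 := by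
  induction b with
  | zero =>
    have h0 : PySem.List.pyRange 0 ((0:Nat) : Int) 1 = [] := by
      apply List.eq_nil_of_length_eq_zero
      rw [PySem.List.length_pyRange_one]
      simp
    rw [h0]
    exact ⟨rfl, fun k => by simp⟩
  | succ b ih =>
    have ih' := ih (by omega)
    have hcast : ((b + 1 : Nat) : Int) = (b : Int) + 1 := by push_cast; ring
    rw [hcast, pyRange_succ_last b, List.foldl_append, List.foldl_cons, List.foldl_nil]
    set R := (PySem.List.pyRange 0 (b : Int) 1).foldl (fun sz i => innerA rows i sz) sz with hR
    have hbR : b < R.length := by rw [ih'.1]; omega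
    have hspec := innerA_spec rows b R hbR
    refine ⟨by rw [hspec.1, ih'.1], fun k => ?_⟩
    rw [hspec.2 k]
    have hRb : R.getD b 0 = sz.getD b 0 := by rw [ih'.2 b]; simp
    by_cases hk : k = b
    · subst hk; rw [if_pos rfl, if_pos (by omega), hRb]
    · rw [if_neg hk, ih'.2 k]
      by_cases hkb : k < b
      · rw [if_pos hkb, if_pos (by omega)]
      · rw [if_neg hkb, if_neg (by omega)]

theorem m_spec (rows : List (List String)) (hne : rows ≠ []) :
    0 ≤ PySem.List.len ((PySem.List.max? rows (fun x => PySem.List.len x)).getD []) ∧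
    (PySem.List.len ((PySem.List.max? rows (fun x => PySem.List.len x)).getD [])).toNat
      = (Fsz rows).length := by
  cases h : PySem.List.max? rows (fun x => PySem.List.len x) with
  | none => exact absurd ((PySem.List.max?_eq_none_iff _ _).1 h) hne
  | some r =>
    have hmem : r ∈ rows := PySem.List.max?_mem h
    have hmax : ∀ y ∈ rows, PySem.List.len y ≤ PySem.List.len r := PySem.List.max?_isMax h
    simp only [Option.getD_some, PySem.List.len_eq]
    refine ⟨by positivity, ?_⟩
    have h1 : r.length ≤ (Fsz rows).length := le_length_Fsz rows r hmem
    have h2 : (Fsz rows).length ≤ r.length := by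
      rcases length_Fsz_attained rows with h0 | ⟨v, hv, he⟩
      · omega
      · have := hmax v hv
        simp only [PySem.List.len_eq] at this
        omega
    omega

theorem szA_eq (rows : List (List String)) (m : Int) (hm0 : 0 ≤ m)
    (hm : m.toNat = (Fsz rows).length) :
    (PySem.List.pyRange 0 m 1).foldl (fun sz i => innerA rows i sz)
      (List.replicate m.toNat 0) = Fsz rows := by
  have hcast : m = ((m.toNat : Nat) : Int) := by omega
  rw [hcast]
  simp only [Int.toNat_natCast]
  have hout := outerA_spec rows m.toNat (List.replicate m.toNat (0 : Int)) (by simp)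
  apply List.ext_getElem
  · rw [hout.1]; simp [hm]
  · intro i h1 h2
    rw [← List.getD_eq_getElem _ 0 h1, ← List.getD_eq_getElem _ 0 h2, hout.2 i, getD_Fsz]
    have hi : i < m.toNat := by
      rw [hout.1] at h1; simpa using h1
    rw [if_pos hi]
    simp

theorem foldl_append_singleton {α β : Type} (l : List α) (f : α → β) (acc : List β) :
    l.foldl (fun acc x => acc ++ [f x]) acc = acc ++ l.map f := by
  induction l generalizing acc with
  | nil => simp
  | cons x l ih => simp [ih]

-- ===== B-side lemmas =====

-- B's zip/drop comprehension is mergeRow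
theorem slice_len {α β : Type} (xs : List α) (l : List β) :
    PySem.List.slice xs (some (PySem.List.len l)) none = xs.drop l.length := by
  rw [show PySem.List.len l = ((l.length : Nat) : Int) by simp [PySem.List.len_eq]]
  exact PySem.List.slice_from_natCast xs l.length

theorem mergeRow_nil (v : List String) :
    mergeRow [] v = v.map (fun w => PySem.Str.len w) := by
  induction v with
  | nil => rfl
  | cons w ws ih => simp [mergeRow, ih]

theorem zipMerge_eq (sz : List Int) (v : List String) :
    (sz.zip v).map (fun p => max p.1 (PySem.Str.len p.2))
      ++ (PySem.List.slice v (some (PySem.List.len sz)) none).map (fun w => PySem.Str.len w)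
      ++ PySem.List.slice sz (some (PySem.List.len v)) none = mergeRow sz v := by
  rw [slice_len, slice_len]
  induction sz generalizing v with
  | nil => simp [mergeRow_nil]
  | cons a l ih =>
    cases v with
    | nil => simp [mergeRow]
    | cons w ws =>
      simp only [mergeRow, List.zip_cons_cons, List.map_cons, List.cons_append, List.length_cons,
        List.drop_succ_cons]
      rw [ih ws]

theorem szB_eq (rows : List (List String)) :
    rows.foldl (fun sz v =>
      (sz.zip v).map (fun p => max p.1 (PySem.Str.len p.2))
        ++ (PySem.List.slice v (some (PySem.List.len sz)) none).map (fun w => PySem.Str.len w)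
        ++ PySem.List.slice sz (some (PySem.List.len v)) none) [] = Fsz rows := by
  have h : (fun (sz : List Int) (v : List String) =>
      (sz.zip v).map (fun p => max p.1 (PySem.Str.len p.2))
        ++ (PySem.List.slice v (some (PySem.List.len sz)) none).map (fun w => PySem.Str.len w)
        ++ PySem.List.slice sz (some (PySem.List.len v)) none) = mergeRow := by
    funext sz v; exact zipMerge_eq sz v
  rw [h]; rfl

-- every word is at most its column's width
theorem le_colFrom_init (rows : List (List String)) (j : Nat) (a b : Int) (h : a ≤ b) :
    colFrom rows j a ≤ colFrom rows j b := by
  induction rows generalizing a b with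
  | nil => exact h
  | cons v rows ih =>
    simp only [colFrom, List.foldl_cons] at *
    apply ih
    split_ifs <;> omega

theorem init_le_colFrom (rows : List (List String)) (j : Nat) (a : Int) :
    a ≤ colFrom rows j a := by
  induction rows generalizing a with
  | nil => simp [colFrom]
  | cons v rows ih =>
    simp only [colFrom, List.foldl_cons] at *
    refine le_trans ?_ (ih _)
    split_ifs <;> omega

theorem word_le_colFrom (rows : List (List String)) (v : List String) (hv : v ∈ rows)
    (j : Nat) (hj : j < v.length) :
    PySem.Str.len (v.getD j "") ≤ colFrom rows j 0 := by
  induction rows with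
  | nil => simp at hv
  | cons u rows ih =>
    rcases List.mem_cons.1 hv with rfl | h
    · show PySem.Str.len (v.getD j "") ≤
        colFrom rows j (if j < v.length then max 0 (PySem.Str.len (v.getD j "")) else 0)
      rw [if_pos hj]
      exact le_trans (le_max_right _ _) (init_le_colFrom rows j _)
    · show PySem.Str.len (v.getD j "") ≤
        colFrom rows j (if j < u.length then max 0 (PySem.Str.len (u.getD j "")) else 0)
      refine le_trans (ih h) (le_colFrom_init rows j 0 _ ?_)
      split_ifs
      · exact le_max_left _ _
      · exact le_refl _

theorem word_le_Fsz (rows : List (List String)) (v : List String) (hv : v ∈ rows)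
    (j : Nat) (hj : j < v.length) :
    PySem.Str.len (v.getD j "") ≤ (Fsz rows).getD j 0 := by
  rw [getD_Fsz]; exact word_le_colFrom rows v hv j hj

-- starts: prefix sums of sz + 1
def stFrom (p : Int) : List Int → List Int
  | [] => []
  | a :: l => p :: stFrom (p + a + 1) l

def sumT (p : Int) : List Int → Int
  | [] => p
  | a :: l => sumT (p + a + 1) l

theorem sp_fold (sz : List Int) (acc : List Int) (p : Int) :
    sz.foldl (fun (sp : List Int × Int) a => (sp.1 ++ [sp.2], sp.2 + a + 1)) (acc, p)
      = (acc ++ stFrom p sz, sumT p sz) := by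
  induction sz generalizing acc p with
  | nil => simp [stFrom, sumT]
  | cons a l ih => simp [stFrom, sumT, ih]

theorem stFrom_getD_succ (p : Int) (sz : List Int) (j : Nat) (hj : j + 1 < sz.length) :
    (stFrom p sz).getD (j + 1) 0 = (stFrom p sz).getD j 0 + sz.getD j 0 + 1 := by
  induction sz generalizing p j with
  | nil => simp at hj
  | cons a l ih =>
    cases j with
    | zero =>
      cases l with
      | nil => simp at hj
      | cons b l' => simp [stFrom]
    | succ j =>
      simp only [stFrom, List.getD_cons_succ]
      exact ih _ j (by simpa using Nat.lt_of_succ_lt_succ hj)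

-- A's per-row list, as a structural recursion (j is the absolute column index, L = len of the row)
def tmpR (sz : List Int) (L : Int) : Int → List String → List String
  | _, [] => []
  | j, w :: v' =>
      (if j == L - 1 then w else w ++ padA (PySem.List.pyGetD sz j 0 - PySem.Str.len w))
        :: tmpR sz L (j + 1) v'

theorem tmpA_eq (sz : List Int) (L : Int) (v : List String) (j : Int) (acc : List String) :
    (PySem.List.enumerate v j).foldl (fun tmp p =>
        if p.1 == L - 1 then tmp ++ [p.2]
        else tmp ++ [p.2 ++ padA (PySem.List.pyGetD sz p.1 0 - PySem.Str.len p.2)]) acc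
      = acc ++ tmpR sz L j v := by
  induction v generalizing j acc with
  | nil => simp [PySem.List.enumerate_nil, tmpR]
  | cons w v' ih =>
    rw [PySem.List.enumerate_cons, List.foldl_cons, tmpR, ih]
    by_cases h : (j == L - 1) = true
    · simp [h]
    · simp [h]

-- B's per-row buffer and cursor, as structural recursions
def bufR (starts : List Int) : Int → Int → List String → List String
  | _, _, [] => []
  | j, n, w :: v' =>
      (padA (PySem.List.pyGetD starts j 0 - n) ++ w)
        :: bufR starts (j + 1) (PySem.List.pyGetD starts j 0 + PySem.Str.len w) v'

theorem bufB_eq (starts : List Int) (v : List String) (j n : Int) (acc : List String) :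
    ((PySem.List.enumerate v j).foldl (fun (bn : List String × Int) p =>
        (bn.1 ++ [padA (PySem.List.pyGetD starts p.1 0 - bn.2) ++ p.2],
         PySem.List.pyGetD starts p.1 0 + PySem.Str.len p.2)) (acc, n)).1
      = acc ++ bufR starts j n v := by
  induction v generalizing j n acc with
  | nil => simp [PySem.List.enumerate_nil, bufR]
  | cons w v' ih =>
    rw [PySem.List.enumerate_cons, List.foldl_cons, bufR, ih]
    simp

-- join helpers
theorem join_nil_cons (x : List Char) (xs : List (List Char)) :
    PySem.Chars.join [] (x :: xs) = x ++ PySem.Chars.join [] xs := by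
  cases xs with
  | nil => rw [PySem.Chars.join_singleton, PySem.Chars.join_nil]; simp
  | cons y ys => rw [PySem.Chars.join_cons_cons]; simp

theorem join_sep_cons (sep : List Char) (x : List Char) (xs : List (List Char)) (h : xs ≠ []) :
    PySem.Chars.join sep (x :: xs) = x ++ sep ++ PySem.Chars.join sep xs := by
  cases xs with
  | nil => exact absurd rfl h
  | cons y ys => exact PySem.Chars.join_cons_cons sep x y ys

-- the heart: B's cursor-rendered characters are a leading gap plus A's padded-joined characters
theorem chars_eq (sz : List Int) (v : List String) (hne : v ≠ []) (j : Nat) (n : Int)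
    (hlen : j + v.length ≤ sz.length)
    (hw : ∀ k, k < v.length → PySem.Str.len (v.getD k "") ≤ sz.getD (j + k) 0) :
    PySem.Chars.join [] ((bufR (stFrom 0 sz) (j : Int) n v).map String.toList)
      = List.replicate ((stFrom 0 sz).getD j 0 - n).toNat ' '
        ++ PySem.Chars.join [' ']
            ((tmpR sz ((j : Int) + v.length) (j : Int) v).map String.toList) := by
  induction v generalizing j n with
  | nil => exact absurd rfl hne
  | cons w v' ih =>
    have hjsz : j < sz.length := by simp at hlen; omega
    have hg : ∀ (i : Nat), PySem.List.pyGetD (stFrom 0 sz) ((i : Nat) : Int) 0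
        = (stFrom 0 sz).getD i 0 := by
      intro i; simp [PySem.List.pyGetD_natCast]
    cases v' with
    | nil =>
      have hT : ((j : Int) == (j : Int) + ([w] : List String).length - 1) = true := by simp
      rw [bufR, tmpR]
      simp only [hT, if_true, List.map_cons, List.map_nil, bufR, tmpR]
      rw [PySem.Chars.join_singleton, PySem.Chars.join_singleton, hg j]
      simp [padA, String.toList_append]
    | cons w2 v'' =>
      have hF : ((j : Int) == (j : Int) + ((w :: w2 :: v'') : List String).length - 1) = false := by
        simp only [List.length_cons]
        have : ((j : Int)) ≠ (j : Int) + (((v''.length + 1 + 1 : Nat)) : Int) - 1 := by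
          push_cast; omega
        simpa using this
      rw [bufR, tmpR]
      simp only [hF, Bool.false_eq_true, if_false, List.map_cons]
      rw [join_nil_cons, join_sep_cons _ _ _ (by simp [tmpR])]
      have hcast : ((j : Int) + 1) = (((j + 1 : Nat)) : Int) := by push_cast; ring
      have hlen' : (j + 1) + (w2 :: v'').length ≤ sz.length := by
        simp at hlen ⊢; omega
      have hw' : ∀ k, k < (w2 :: v'').length →
          PySem.Str.len ((w2 :: v'').getD k "") ≤ sz.getD ((j + 1) + k) 0 := by
        intro k hk
        have := hw (k + 1) (by simpa using Nat.succ_lt_succ hk)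
        simpa [Nat.add_assoc, Nat.add_comm 1 k] using this
      rw [hg j, hcast]
      rw [ih (by simp) (j + 1) ((stFrom 0 sz).getD j 0 + PySem.Str.len w) hlen' hw']
      have hstep : (stFrom 0 sz).getD (j + 1) 0
          = (stFrom 0 sz).getD j 0 + sz.getD j 0 + 1 := by
        apply stFrom_getD_succ
        simp at hlen; omega
      have hwj : PySem.Str.len w ≤ sz.getD j 0 := by
        have := hw 0 (by simp)
        simpa using this
      have hgap : ((stFrom 0 sz).getD (j + 1) 0 - ((stFrom 0 sz).getD j 0 + PySem.Str.len w)).toNat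
          = (sz.getD j 0 - PySem.Str.len w).toNat + 1 := by
        rw [hstep]; omega
      rw [hgap, List.replicate_succ']
      have hgsz : PySem.List.pyGetD sz ((j : Nat) : Int) 0 = sz.getD j 0 := by
        simp [PySem.List.pyGetD_natCast]
      have hLrw : tmpR sz ((((j + 1 : Nat)) : Int) + ((w2 :: v'').length : Int))
            (((j + 1 : Nat)) : Int) (w2 :: v'')
          = tmpR sz ((j : Int) + ((w :: w2 :: v'') : List String).length)
            (((j + 1 : Nat)) : Int) (w2 :: v'') := by
      -- the two L arguments are the same integer
        congr 1
        simp only [List.length_cons]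
        push_cast; ring
      rw [hLrw, hgsz]
      simp only [padA, String.toList_append, String.toList_ofList]
      simp [List.append_assoc]

-- one row: B's cursor line equals A's padded-join line
theorem row_eq (sz : List Int) (v : List String)
    (hlen : v.length ≤ sz.length)
    (hw : ∀ k, k < v.length → PySem.Str.len (v.getD k "") ≤ sz.getD k 0) :
    PySem.Str.join "" (bufR (stFrom 0 sz) 0 0 v)
      = PySem.Str.join " " (tmpR sz (PySem.List.len v) 0 v) := by
  cases hv : v with
  | nil => rfl
  | cons w v' =>
    subst hv
    have hchars := chars_eq sz (w :: v') (by simp) 0 0 (by simpa using hlen)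
      (by simpa using hw)
    have hzero : ((stFrom 0 sz).getD 0 0 - 0).toNat = 0 := by
      cases sz with
      | nil => simp [stFrom]
      | cons a l => simp [stFrom]
    rw [hzero] at hchars
    simp only [List.replicate_zero, List.nil_append, Nat.cast_zero] at hchars
    have hto : (PySem.Str.join "" (bufR (stFrom 0 sz) 0 0 (w :: v'))).toList
        = (PySem.Str.join " " (tmpR sz (PySem.List.len (w :: v')) 0 (w :: v'))).toList := by
      rw [PySem.Str.toList_join, PySem.Str.toList_join]
      have h0 : (("" : String)).toList = ([] : List Char) := rfl
      have h1 : ((" " : String)).toList = ([' '] : List Char) := rfl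
      rw [h0, h1]
      have hL : PySem.List.len (w :: v') = ((0 : Nat) : Int) + (((w :: v') : List String).length : Int) := by
        simp [PySem.List.len_eq]
      rw [hL]
      simpa using hchars
    have := congrArg String.ofList hto
    simpa using this

theorem main_eq (rows : List (List String)) : Abody rows = Bbody rows := by
  by_cases hne : rows = []
  · subst hne; rfl
  · simp only [Abody, Bbody]
    obtain ⟨hm0, hmlen⟩ := m_spec rows hne
    rw [szA_eq rows _ hm0 hmlen, szB_eq rows, sp_fold]
    simp only [List.nil_append]
    -- rewrite both line folds as maps
    have hrewA : (fun (ans : List (List String)) (v : List String) =>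
        ans ++ [(PySem.List.enumerate v 0).foldl (fun tmp p =>
          if p.1 == PySem.List.len v - 1 then tmp ++ [p.2]
          else tmp ++ [p.2 ++ padA (PySem.List.pyGetD (Fsz rows) p.1 0 - PySem.Str.len p.2)]) []])
        = fun ans v => ans ++ [tmpR (Fsz rows) (PySem.List.len v) 0 v] := by
      funext ans v
      rw [tmpA_eq (Fsz rows) (PySem.List.len v) v 0 []]
      simp
    have hrewB : (fun (lines : List String) (v : List String) =>
        let bn := (PySem.List.enumerate v 0).foldl (fun (bn : List String × Int) p =>
            (bn.1 ++ [padA (PySem.List.pyGetD (stFrom 0 (Fsz rows)) p.1 0 - bn.2) ++ p.2],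
             PySem.List.pyGetD (stFrom 0 (Fsz rows)) p.1 0 + PySem.Str.len p.2)) ([], 0)
        lines ++ [PySem.Str.join "" bn.1])
        = fun lines v => lines ++ [PySem.Str.join "" (bufR (stFrom 0 (Fsz rows)) 0 0 v)] := by
      funext lines v
      simp only []
      rw [bufB_eq (stFrom 0 (Fsz rows)) v 0 0 []]
      simp
    rw [hrewA, hrewB,
        foldl_append_singleton rows (fun v => tmpR (Fsz rows) (PySem.List.len v) 0 v) [],
        foldl_append_singleton rows (fun v => PySem.Str.join "" (bufR (stFrom 0 (Fsz rows)) 0 0 v)) []]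
    simp only [List.nil_append, List.map_map]
    apply congrArg
    apply List.map_congr_left
    intro v hv
    simp only [Function.comp]
    exact (row_eq (Fsz rows) v (le_length_Fsz rows v hv)
      (fun k hk => word_le_Fsz rows v hv k hk)).symm

-- the two parses of the input are the same list of rows
theorem rows_eq (s : String) :
    (((PySem.Str.split? s "\n").getD []).map (fun x => PySem.Str.strip x)).map
        (fun x => PySem.Str.split₀ x) =
      ((PySem.Str.split? s "\n").getD []).map
        (fun line => PySem.Str.split₀ (PySem.Str.strip line)) := by
  rw [List.map_map]; rfl

-- ===== VERDICT (by name: the statement is the Claim_ definition above) =====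
theorem solution_spec : Claim_equal_solution := by
  intro s _
  unfold Spec_solution
  have hA : solution s = Abody ((((PySem.Str.split? s "\n").getD []).map
      (fun x => PySem.Str.strip x)).map (fun x => PySem.Str.split₀ x)) := rfl
  have hB : solution_alt s = Bbody (((PySem.Str.split? s "\n").getD []).map
      (fun line => PySem.Str.split₀ (PySem.Str.strip line))) := rfl
  rw [hA, hB, rows_eq]
  exact main_eq _
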